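-- pv_equiv track=rewrite | github.com/woo427/Algorithm | 프로그래머스/1/12918. 문자열 다루기 기본/문자열 다루기 기본.py | solution
-- ===== SOURCE A (Python) =====
-- def solution(s):
--     if len(s) == 4 or len(s) == 6:
--         for i in s:
--             if ord(i) < 48 or ord(i) > 57:
--                 return False
--             else:
--                 continue
--         else:
--             return True
--     else:
--         return False
-- ===== SOURCE B (Python) =====
-- import re
--
-- _PAT = re.compile(r'[0-9]{4}|[0-9]{6}')
--
-- def solution(s):
--     return _PAT.fullmatch(s) is not None
-- ===== Notes on version B (the rewrite author's own statement) =====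
-- stated objective: idiomatic
-- what changed: Replaced the explicit length test plus per-character ord() scan with a single precompiled regex fullmatch of [0-9]{4}|[0-9]{6}, which encodes both the length and ASCII-digit constraints declaratively.
import Mathlib
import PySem

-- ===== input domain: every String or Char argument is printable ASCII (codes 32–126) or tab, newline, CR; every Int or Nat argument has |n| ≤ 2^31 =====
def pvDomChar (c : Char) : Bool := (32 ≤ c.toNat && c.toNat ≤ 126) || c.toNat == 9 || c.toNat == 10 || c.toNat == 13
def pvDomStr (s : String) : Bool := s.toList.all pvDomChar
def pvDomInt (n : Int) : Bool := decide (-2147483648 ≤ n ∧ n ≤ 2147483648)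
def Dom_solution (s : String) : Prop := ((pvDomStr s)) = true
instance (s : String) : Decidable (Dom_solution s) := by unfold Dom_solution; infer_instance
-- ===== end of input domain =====

-- B replaces the length test + per-character ord() scan with one regex fullmatch of [0-9]{4}|[0-9]{6} (idiomatic).

-- ===== PORT A =====
-- A's for-loop with early `return False` and for/else `return True`.
def pvLoopA : List Char → Bool
  | [] => true
  | c :: rest => if c.toNat < 48 || c.toNat > 57 then false else pvLoopA rest

def solution (s : String) : Bool :=
  if s.toList.length = 4 || s.toList.length = 6 then pvLoopA s.toList else false

-- ===== PORT B =====
-- re.fullmatch on the fixed pattern [0-9]{4}|[0-9]{6} is ported by its exact semantics: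
-- the alternation matches iff the string is 4 chars all in '0'..'9', or 6 chars all in '0'..'9'.
def pvMatchDigits (n : Nat) (l : List Char) : Bool :=
  l.length == n && l.all (fun c => '0' ≤ c && c ≤ '9')

def solution_alt (s : String) : Bool :=
  pvMatchDigits 4 s.toList || pvMatchDigits 6 s.toList

-- ===== PRECONDITION & SPEC =====
def Spec_solution (s : String) (out : Bool) : Prop := out = solution_alt s
instance (s : String) (out : Bool) : Decidable (Spec_solution s out) := by unfold Spec_solution; infer_instance

-- ===== CLAIM (what is proved, stated in full; the proofs are below) =====
def Claim_equal_solution : Prop := ∀ (s : String), Dom_solution s → Spec_solution s (solution s)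

-- ===== LEMMAS AND PROOFS =====
theorem pvLoopA_eq_all (l : List Char) :
    pvLoopA l = l.all (fun c => '0' ≤ c && c ≤ '9') := by
  induction l with
  | nil => rfl
  | cons c rest ih =>
    simp only [pvLoopA, List.all_cons]
    by_cases h : c.toNat < 48 || c.toNat > 57
    · simp only [h, if_true]
      have : ¬ ('0' ≤ c ∧ c ≤ '9') := by
        simp only [Bool.or_eq_true, decide_eq_true_eq] at h
        intro ⟨h1, h2⟩
        rw [Char.le_def] at h1 h2
        have e1 : ('0' : Char).val.toNat = 48 := by decide
        have e2 : ('9' : Char).val.toNat = 57 := by decide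
        have t1 : ('0' : Char).val.toNat ≤ c.val.toNat := UInt32.le_iff_toNat_le.mp h1
        have t2 : c.val.toNat ≤ ('9' : Char).val.toNat := UInt32.le_iff_toNat_le.mp h2
        unfold Char.toNat at h
        omega
      simp [this]
    · simp only [h, ih]
      have : ('0' ≤ c && c ≤ '9') = true := by
        simp only [Bool.or_eq_true, decide_eq_true_eq, not_or, not_lt] at h
        obtain ⟨h1, h2⟩ := h
        unfold Char.toNat at h1 h2
        have e1 : ('0' : Char).val.toNat = 48 := by decide
        have e2 : ('9' : Char).val.toNat = 57 := by decide
        simp only [Bool.and_eq_true, decide_eq_true_eq, Char.le_def, UInt32.le_iff_toNat_le]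
        omega
      simp [this]

-- ===== VERDICT (by name: the statement is the Claim_ definition above) =====
theorem solution_spec : Claim_equal_solution := by
  intro s _
  unfold Spec_solution solution solution_alt pvMatchDigits
  rw [pvLoopA_eq_all]
  by_cases h4 : s.length = 4 <;> by_cases h6 : s.length = 6 <;> simp [h4, h6]
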